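-- pv_equiv track=rewrite | github.com/Kryskata-C/belot-bot | detector.py | _group_blobs_into_cards
-- ===== SOURCE A (Python) =====
-- def _group_blobs_into_cards(blobs: list) -> list[list]:
--     """Group nearby text blobs into per-card clusters."""
--     if not blobs:
--         return []
--
--     groups = [[blobs[0]]]
--     for blob in blobs[1:]:
--         last_group = groups[-1]
--         # Check if this blob is close to the last group (same card)
--         last_x = max(b[0] + b[2] for b in last_group)
--         first_x = min(b[0] for b in last_group)
--         blob_x = blob[0]
--
--         # Same card if x-overlap or very close
--         if blob_x < last_x + 20 and blob_x >= first_x - 20: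
--             last_group.append(blob)
--         else:
--             groups.append([blob])
--
--     return groups
-- ===== SOURCE B (Python) =====
-- def _group_blobs_into_cards(blobs: list) -> list[list]:
--     """Group nearby text blobs into per-card clusters.
--
--     Two staged passes instead of A's single grow-the-last-group loop:
--     pass 1 walks the blobs once, tracking only the scalar bounds min(x) and
--     max(x+w) of the card in progress and recording the index of every blob
--     that starts a new card; pass 2 slices the blob list at those cut
--     indices."""
--     cuts = []
--     hi = lo = 0
--     for i, blob in enumerate(blobs):
--         x = blob[0]
--         if i == 0 or not (lo - 20 <= x < hi + 20):
--             cuts.append(i)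
--             hi = x + blob[2]
--             lo = x
--         else:
--             hi = max(hi, x + blob[2])
--             lo = min(lo, x)
--     return [blobs[a:b] for a, b in zip(cuts, cuts[1:] + [len(blobs)])]
-- ===== Notes on version B (the rewrite author's own statement) =====
-- stated objective: alternative
-- what changed: B replaces A's single loop that grows groups[-1] while rescanning it with max/min generator passes by two staged passes: pass 1 records the cut indices where a new card starts while carrying only two scalar running bounds, pass 2 builds the output by slicing the blob list between consecutive cuts.
-- outside the precondition, e.g. on _group_blobs_into_cards([[0, 0, 1], [5]]): A returns [[[0, 0, 1], [5]]], B raises IndexError; on _group_blobs_into_cards([[3]]): A returns [[[3]]], B raises IndexError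
import Mathlib
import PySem

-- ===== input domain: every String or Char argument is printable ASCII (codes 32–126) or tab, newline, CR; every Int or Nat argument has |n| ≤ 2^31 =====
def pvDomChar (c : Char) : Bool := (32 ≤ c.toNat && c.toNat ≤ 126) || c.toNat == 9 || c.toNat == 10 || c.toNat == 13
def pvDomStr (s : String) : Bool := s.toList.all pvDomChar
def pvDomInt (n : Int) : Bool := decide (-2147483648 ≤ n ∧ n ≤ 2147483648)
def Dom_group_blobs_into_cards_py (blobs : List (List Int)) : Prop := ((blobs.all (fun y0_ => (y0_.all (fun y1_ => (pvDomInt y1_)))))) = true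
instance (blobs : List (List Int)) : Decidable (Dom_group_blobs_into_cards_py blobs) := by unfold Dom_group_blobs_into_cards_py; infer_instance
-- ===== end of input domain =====

-- B groups by two staged passes (record cut indices with two scalar running bounds, then
-- slice the blob list between consecutive cuts) instead of A's single loop that grows the
-- last group while rescanning it; return value only, neither version mutates its argument.

-- ===== PORT A =====
-- max(b[0] + b[2] for b in g): first element as seed, fold max over the rest.
-- (indices 0 and 2 are in range under Pre_, so List.getD is exact there)
def pvA_lastX (g : List (List Int)) : Int :=
  match g with
  | [] => 0
  | b :: rest => rest.foldl (fun m b => max m (b.getD 0 0 + b.getD 2 0)) (b.getD 0 0 + b.getD 2 0)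

-- min(b[0] for b in g)
def pvA_firstX (g : List (List Int)) : Int :=
  match g with
  | [] => 0
  | b :: rest => rest.foldl (fun m b => min m (b.getD 0 0)) (b.getD 0 0)

-- one iteration of A's loop body; `last_group.append(blob)` on groups[-1] is
-- `groups.dropLast ++ [last ++ [blob]]` (groups is never empty here)
def pvA_step (groups : List (List (List Int))) (blob : List Int) : List (List (List Int)) :=
  let last := groups.getLastD []
  let lastX := pvA_lastX last
  let firstX := pvA_firstX last
  let blobX := blob.getD 0 0
  if blobX < lastX + 20 ∧ firstX - 20 ≤ blobX then
    groups.dropLast ++ [last ++ [blob]]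
  else
    groups ++ [[blob]]

def group_blobs_into_cards_py (blobs : List (List Int)) : List (List (List Int)) :=
  match blobs with
  | [] => []
  | b :: rest => rest.foldl pvA_step [[b]]

-- ===== PORT B =====
-- pass 1 step: state (cuts, hi, lo); folded over enumerate(blobs) = blobs.zipIdx
def pvB_cutStep (st : List Int × Int × Int) (p : List Int × Nat) : List Int × Int × Int :=
  let x := p.1.getD 0 0
  if p.2 = 0 ∨ ¬(st.2.2 - 20 ≤ x ∧ x < st.2.1 + 20) then
    (st.1 ++ [(p.2 : Int)], x + p.1.getD 2 0, x)
  else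
    (st.1, max st.2.1 (x + p.1.getD 2 0), min st.2.2 x)

def group_blobs_into_cards_py_alt (blobs : List (List Int)) : List (List (List Int)) :=
  let cuts := (blobs.zipIdx.foldl pvB_cutStep ([], 0, 0)).1
  (cuts.zip (cuts.drop 1 ++ [(blobs.length : Int)])).map
    (fun ab => PySem.List.slice blobs (some ab.1) (some ab.2))

-- ===== PRECONDITION & SPEC =====
-- Pre_ excludes lists containing a blob with fewer than 3 entries: A raises IndexError on
-- almost all of them, and on the remaining corners (a short blob whose width A never reads)
-- B's own pass 1 reads blob[2] and raises IndexError itself.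
def Pre_group_blobs_into_cards_py (blobs : List (List Int)) : Prop :=
  ∀ b ∈ blobs, 3 ≤ b.length
instance (blobs : List (List Int)) : Decidable (Pre_group_blobs_into_cards_py blobs) := by
  unfold Pre_group_blobs_into_cards_py; infer_instance
def pvWitness_group_blobs_into_cards_py : List (List Int) :=
  [[0, 0, 5], [3, 1, 4], [100, 0, 6]]
def Spec_group_blobs_into_cards_py (blobs : List (List Int)) (out : List (List (List Int))) : Prop := out = group_blobs_into_cards_py_alt blobs
instance (blobs : List (List Int)) (out : List (List (List Int))) : Decidable (Spec_group_blobs_into_cards_py blobs out) := by unfold Spec_group_blobs_into_cards_py; infer_instance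

-- ===== CLAIM (what is proved, stated in full; the proofs are below) =====
def Claim_equal_group_blobs_into_cards_py : Prop := ∀ (blobs : List (List Int)), Dom_group_blobs_into_cards_py blobs → Pre_group_blobs_into_cards_py blobs → Spec_group_blobs_into_cards_py blobs (group_blobs_into_cards_py blobs)

-- ===== LEMMAS AND PROOFS =====

-- the cut indices pass 1 emits after the first blob, starting at index i with bounds hi/lo
def pvCutsFrom (i : Nat) (hi lo : Int) : List (List Int) → List Int
  | [] => []
  | b :: rs =>
    let x := b.getD 0 0
    if x < hi + 20 ∧ lo - 20 ≤ x then pvCutsFrom (i + 1) (max hi (x + b.getD 2 0)) (min lo x) rs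
    else (i : Int) :: pvCutsFrom (i + 1) (x + b.getD 2 0) x rs

-- pass 2 of B as a function of the cut list
def pvSeg (blobs : List (List Int)) (cuts : List Int) : List (List (List Int)) :=
  (cuts.zip (cuts.drop 1 ++ [(blobs.length : Int)])).map
    (fun ab => PySem.List.slice blobs (some ab.1) (some ab.2))

theorem pvSeg_cons (blobs : List (List Int)) (a b : Int) (cs : List Int) :
    pvSeg blobs (a :: b :: cs) =
      PySem.List.slice blobs (some a) (some b) :: pvSeg blobs (b :: cs) := by
  simp [pvSeg]

theorem pv_lastX_concat (c : List (List Int)) (hc : c ≠ []) (blob : List Int) :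
    pvA_lastX (c ++ [blob]) = max (pvA_lastX c) (blob.getD 0 0 + blob.getD 2 0) := by
  cases c with
  | nil => exact absurd rfl hc
  | cons b rest => simp [pvA_lastX, List.foldl_append]

theorem pv_firstX_concat (c : List (List Int)) (hc : c ≠ []) (blob : List Int) :
    pvA_firstX (c ++ [blob]) = min (pvA_firstX c) (blob.getD 0 0) := by
  cases c with
  | nil => exact absurd rfl hc
  | cons b rest => simp [pvA_firstX, List.foldl_append]

-- B's fold over zipIdx, away from index 0, appends exactly pvCutsFrom
theorem pv_fold_cuts (rest : List (List Int)) :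
    ∀ (i : Nat) (cuts : List Int) (hi lo : Int), 1 ≤ i →
      ((rest.zipIdx i).foldl pvB_cutStep (cuts, hi, lo)).1 = cuts ++ pvCutsFrom i hi lo rest := by
  induction rest with
  | nil => intro i cuts hi lo _; simp [pvCutsFrom]
  | cons b rs ih =>
    intro i cuts hi lo hi1
    have hne : ¬ i = 0 := by omega
    by_cases h : lo - 20 ≤ b.getD 0 0 ∧ b.getD 0 0 < hi + 20
    · have hstep : pvB_cutStep (cuts, hi, lo) (b, i) =
          (cuts, max hi (b.getD 0 0 + b.getD 2 0), min lo (b.getD 0 0)) := by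
        simp only [pvB_cutStep]
        rw [if_neg (by tauto)]
      have hflag : pvCutsFrom i hi lo (b :: rs) =
          pvCutsFrom (i + 1) (max hi (b.getD 0 0 + b.getD 2 0)) (min lo (b.getD 0 0)) rs := by
        simp only [pvCutsFrom]
        rw [if_pos (by tauto)]
      rw [List.zipIdx_cons, List.foldl_cons, hstep, ih (i + 1) _ _ _ (by omega), hflag]
    · have hstep : pvB_cutStep (cuts, hi, lo) (b, i) =
          (cuts ++ [(i : Int)], b.getD 0 0 + b.getD 2 0, b.getD 0 0) := by
        simp only [pvB_cutStep]
        rw [if_pos (by tauto)]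
      have hflag : pvCutsFrom i hi lo (b :: rs) =
          (i : Int) :: pvCutsFrom (i + 1) (b.getD 0 0 + b.getD 2 0) (b.getD 0 0) rs := by
        simp only [pvCutsFrom]
        rw [if_neg (by tauto)]
      rw [List.zipIdx_cons, List.foldl_cons, hstep, ih (i + 1) _ _ _ (by omega), hflag]
      simp

-- key invariant: A's remaining fold equals the slicing of blobs at the remaining cuts
theorem pv_key (rest : List (List Int)) :
    ∀ (blobs : List (List Int)) (G : List (List (List Int))) (c : List (List Int)) (j : Nat),
      c ≠ [] → blobs.drop j = c ++ rest →
      rest.foldl pvA_step (G ++ [c]) =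
        G ++ pvSeg blobs ((j : Int) :: pvCutsFrom (j + c.length) (pvA_lastX c) (pvA_firstX c) rest) := by
  induction rest with
  | nil =>
    intro blobs G c j hc hdrop
    have hjle : j ≤ blobs.length := by
      by_contra hlt
      rw [List.drop_eq_nil_of_le (by omega)] at hdrop
      exact hc (by simpa using hdrop.symm)
    have hlen : blobs.length - j = c.length := by
      have := congrArg List.length hdrop
      simp [List.length_drop] at this
      omega
    simp only [pvSeg, pvCutsFrom, List.drop, List.zip, List.foldl_nil, List.nil_append,
      List.zipWith, List.map]
    rw [PySem.List.slice_natCast]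
    rw [hdrop, List.append_nil]
    congr 1
    rw [hlen, List.take_length]
  | cons blob rs ih =>
    intro blobs G c j hc hdrop
    have hlast : (G ++ [c]).getLastD [] = c := by simp
    by_cases h : blob.getD 0 0 < pvA_lastX c + 20 ∧ pvA_firstX c - 20 ≤ blob.getD 0 0
    · -- blob joins the current card
      have hA : pvA_step (G ++ [c]) blob = G ++ [c ++ [blob]] := by
        simp only [pvA_step, hlast, List.dropLast_concat]
        rw [if_pos h]
      have hdrop' : blobs.drop j = (c ++ [blob]) ++ rs := by simpa using hdrop
      have := ih blobs G (c ++ [blob]) j (by simp) hdrop'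
      rw [List.foldl_cons, hA, this,
        pv_lastX_concat c hc, pv_firstX_concat c hc]
      have hcut : pvCutsFrom (j + c.length) (pvA_lastX c) (pvA_firstX c) (blob :: rs) =
          pvCutsFrom (j + c.length + 1) (max (pvA_lastX c) (blob.getD 0 0 + blob.getD 2 0))
            (min (pvA_firstX c) (blob.getD 0 0)) rs := by
        simp only [pvCutsFrom]
        rw [if_pos (by tauto)]
      rw [hcut]
      have hlen : (c ++ [blob]).length = c.length + 1 := by simp
      rw [hlen, Nat.add_assoc]
    · -- blob starts a new card
      have hA : pvA_step (G ++ [c]) blob = (G ++ [c]) ++ [[blob]] := by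
        simp only [pvA_step, hlast]
        rw [if_neg h]
      have hdropc : blobs.drop (j + c.length) = [blob] ++ rs := by
        have h2 : (blobs.drop j).drop c.length = [blob] ++ rs := by
          rw [hdrop, List.drop_left]
          rfl
        rw [List.drop_drop] at h2
        simpa [Nat.add_comm] using h2
      have := ih blobs (G ++ [c]) [blob] (j + c.length) (by simp) hdropc
      rw [List.foldl_cons, hA, this]
      have hcut : pvCutsFrom (j + c.length) (pvA_lastX c) (pvA_firstX c) (blob :: rs) =
          ((j + c.length : Nat) : Int) ::
            pvCutsFrom (j + c.length + 1) (blob.getD 0 0 + blob.getD 2 0) (blob.getD 0 0) rs := by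
        simp only [pvCutsFrom]
        rw [if_neg (by tauto)]
      rw [hcut]
      have hjle : j + c.length ≤ blobs.length := by
        have := congrArg List.length hdropc
        simp [List.length_drop] at this
        omega
      have hslice : PySem.List.slice blobs (some (j : Int)) (some ((j + c.length : Nat) : Int)) = c := by
        rw [PySem.List.slice_natCast, hdrop]
        have : j + c.length - j = c.length := by omega
        rw [this, List.take_left]
      -- peel the first segment (j, j + c.length) off pvSeg
      rw [pvSeg_cons, hslice]
      simp [pvA_lastX, pvA_firstX]

-- ===== VERDICT (by name: the statement is the Claim_ definition above) =====
theorem group_blobs_into_cards_py_spec : Claim_equal_group_blobs_into_cards_py := by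
  intro blobs _ _
  unfold Spec_group_blobs_into_cards_py
  cases blobs with
  | nil => rfl
  | cons b rest =>
    simp only [group_blobs_into_cards_py, group_blobs_into_cards_py_alt]
    have hstep0 : pvB_cutStep ([], 0, 0) (b, 0) =
        ([(0 : Int)], b.getD 0 0 + b.getD 2 0, b.getD 0 0) := by
      simp [pvB_cutStep]
    have hcuts : (((b :: rest).zipIdx.foldl pvB_cutStep ([], 0, 0))).1 =
        (0 : Int) :: pvCutsFrom 1 (b.getD 0 0 + b.getD 2 0) (b.getD 0 0) rest := by
      rw [List.zipIdx_cons, List.foldl_cons, hstep0,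
        pv_fold_cuts rest 1 [(0 : Int)] _ _ (by omega)]
      rfl
    have hkey := pv_key rest (b :: rest) [] [b] 0 (by simp) (by simp)
    simp only [List.nil_append] at hkey
    rw [hcuts, hkey]
    simp [pvSeg, pvA_lastX, pvA_firstX]
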